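-- pv_equiv track=rewrite | github.com/Raikaru/NativeCart | gdextension/tools/generate_portable_battle_script_data.py | parse_macro_params
-- ===== SOURCE A (Python) =====
-- def split_args(text):
--     args = []
--     current = []
--     depth = 0
--     for ch in text:
--         if ch == ',' and depth == 0:
--             args.append(''.join(current).strip())
--             current = []
--             continue
--         if ch in '([{':
--             depth += 1
--         elif ch in ')]}':
--             depth -= 1
--         current.append(ch)
--     tail = ''.join(current).strip()
--     if tail:
--         args.append(tail)
--     return args
--
-- def parse_macro_params(text):
--     params = []
--     defaults = {}
--     if not text.strip():
--         return params, defaults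
--     for item in split_args(text):
--         if '=' in item:
--             name, default = item.split('=', 1)
--             name = name.split(':', 1)[0].strip()
--             params.append(name)
--             defaults[name] = default.strip()
--         else:
--             params.append(item.split(':', 1)[0].strip())
--     return params, defaults
-- ===== SOURCE B (Python) =====
-- def parse_macro_params(text):
--     # Single-pass state machine: one scan over the characters tracking bracket
--     # depth, the current segment's characters, and the indices of the first '='
--     # and first ':' seen in the segment; segments are closed directly into
--     # params/defaults with no intermediate argument list.
--     params = []
--     defaults = {}
--     if not text.strip():
--         return params, defaults
--     seg = []
--     eq = -1
--     colon = -1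
--     depth = 0
--
--     def close():
--         if eq >= 0:
--             cut = colon if 0 <= colon < eq else eq
--             name = ''.join(seg[:cut]).strip()
--             params.append(name)
--             defaults[name] = ''.join(seg[eq + 1:]).strip()
--         else:
--             cut = colon if colon >= 0 else len(seg)
--             params.append(''.join(seg[:cut]).strip())
--
--     for ch in text:
--         if ch == ',' and depth == 0:
--             close()
--             seg = []
--             eq = -1
--             colon = -1
--             continue
--         if ch in '([{':
--             depth += 1
--         elif ch in ')]}':
--             depth -= 1
--         if ch == '=' and eq < 0:
--             eq = len(seg)
--         elif ch == ':' and colon < 0: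
--             colon = len(seg)
--         seg.append(ch)
--     if ''.join(seg).strip():
--         close()
--     return params, defaults
-- ===== Notes on version B (the rewrite author's own statement) =====
-- stated objective: alternative
-- what changed: A splits the text into an intermediate argument list (depth-aware comma split) and then re-scans each item with string splits on the equals sign and the colon; B is a single-pass state machine over the characters that tracks bracket depth and the index of the first equals sign and first colon of the current segment, closing each segment directly into params/defaults with no intermediate args list and no per-item re-scan.
import Mathlib
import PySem

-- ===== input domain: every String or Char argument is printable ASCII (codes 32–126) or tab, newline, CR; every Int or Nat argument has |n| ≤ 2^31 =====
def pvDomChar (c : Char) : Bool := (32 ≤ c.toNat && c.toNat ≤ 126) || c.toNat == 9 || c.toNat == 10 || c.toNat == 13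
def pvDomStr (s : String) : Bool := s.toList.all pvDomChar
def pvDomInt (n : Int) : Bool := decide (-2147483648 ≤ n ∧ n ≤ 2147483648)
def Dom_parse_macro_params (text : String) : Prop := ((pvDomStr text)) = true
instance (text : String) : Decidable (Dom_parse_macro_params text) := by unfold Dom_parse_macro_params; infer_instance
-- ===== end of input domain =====

-- B re-implements A as a single-pass state machine (bracket depth plus the indices of the first
-- equals sign and first colon per segment, segments closed directly into params/defaults with no
-- intermediate args list); same return value, same O(n) cost (alternative decomposition, not faster).

-- ===== PORT A =====
-- split_args: one fold over the characters with state (args, current, depth)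
def pvSplitStepA (st : List (List Char) × List Char × Int) (ch : Char) : List (List Char) × List Char × Int :=
  if ch = ',' ∧ st.2.2 = 0 then (st.1 ++ [PySem.Chars.strip st.2.1], [], st.2.2)
  else
    let depth := if ch ∈ ['(', '[', '{'] then st.2.2 + 1
      else if ch ∈ [')', ']', '}'] then st.2.2 - 1 else st.2.2
    (st.1, st.2.1 ++ [ch], depth)

def pvSplitArgsA (cs : List Char) : List (List Char) :=
  let st := cs.foldl pvSplitStepA ([], [], 0)
  let tail := PySem.Chars.strip st.2.1
  if tail ≠ [] then st.1 ++ [tail] else st.1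

-- the body of A's per-item loop (membership test, split at the first equals sign, colon-truncate, strip)
def pvProcItemA (pd : List String × PySem.Dict String String) (item : List Char) :
    List String × PySem.Dict String String :=
  if PySem.Chars.isIn ['='] item then
    let parts := PySem.Chars.splitOnMax item ['='] 1
    let name0 := parts.headD []
    let dflt := (parts.drop 1).headD []
    let name := String.ofList (PySem.Chars.strip ((PySem.Chars.splitOnMax name0 [':'] 1).headD []))
    (pd.1 ++ [name], pd.2.insert name (String.ofList (PySem.Chars.strip dflt)))
  else
    (pd.1 ++ [String.ofList (PySem.Chars.strip ((PySem.Chars.splitOnMax item [':'] 1).headD []))], pd.2)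

def parse_macro_params (text : String) : List String × (List (String × String)) :=
  if PySem.Str.strip text = "" then ([], [])
  else
    let res := (pvSplitArgsA text.toList).foldl pvProcItemA ([], (⟨[]⟩ : PySem.Dict String String))
    (res.1, res.2.items)

-- ===== PORT B =====
-- close(): emit the current segment from its recorded first-index fields
def pvCloseB (pd : List String × PySem.Dict String String) (seg : List Char) (eq colon : Int) :
    List String × PySem.Dict String String :=
  if 0 ≤ eq then
    let cut := if 0 ≤ colon ∧ colon < eq then colon else eq
    let name := String.ofList (PySem.Chars.strip (PySem.List.slice seg none (some cut)))
    (pd.1 ++ [name],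
     pd.2.insert name (String.ofList (PySem.Chars.strip (PySem.List.slice seg (some (eq + 1)) none))))
  else
    let cut := if 0 ≤ colon then colon else (seg.length : Int)
    (pd.1 ++ [String.ofList (PySem.Chars.strip (PySem.List.slice seg none (some cut)))], pd.2)

-- the single pass: state (params+defaults, seg, eq, colon, depth)
def pvScanB (cs : List Char) (pd : List String × PySem.Dict String String)
    (seg : List Char) (eq colon depth : Int) : List String × PySem.Dict String String :=
  match cs with
  | [] => if PySem.Chars.strip seg ≠ [] then pvCloseB pd seg eq colon else pd
  | ch :: rest =>
    if ch = ',' ∧ depth = 0 then pvScanB rest (pvCloseB pd seg eq colon) [] (-1) (-1) depth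
    else
      let depth' := if ch ∈ ['(', '[', '{'] then depth + 1
        else if ch ∈ [')', ']', '}'] then depth - 1 else depth
      let eq' := if ch = '=' ∧ eq < 0 then (seg.length : Int) else eq
      let colon' := if ¬(ch = '=' ∧ eq < 0) ∧ (ch = ':' ∧ colon < 0) then (seg.length : Int) else colon
      pvScanB rest pd (seg ++ [ch]) eq' colon' depth'

def parse_macro_params_alt (text : String) : List String × (List (String × String)) :=
  if PySem.Str.strip text = "" then ([], [])
  else
    let res := pvScanB text.toList ([], (⟨[]⟩ : PySem.Dict String String)) [] (-1) (-1) 0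
    (res.1, res.2.items)

-- ===== PRECONDITION & SPEC =====
def Spec_parse_macro_params (text : String) (out : List String × (List (String × String))) : Prop := out = parse_macro_params_alt text
instance (text : String) (out : List String × (List (String × String))) : Decidable (Spec_parse_macro_params text out) := by unfold Spec_parse_macro_params; infer_instance

-- ===== CLAIM (what is proved, stated in full; the proofs are below) =====
def Claim_equal_parse_macro_params : Prop := ∀ (text : String), Dom_parse_macro_params text → Spec_parse_macro_params text (parse_macro_params text)

-- ===== LEMMAS AND PROOFS =====

-- first index of c in s, Python-style (-1 if absent)
def pvFI (s : List Char) (c : Char) : Int :=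
  match s.findIdx? (· = c) with
  | some i => (i : Int)
  | none => -1

theorem pvFI_nil (c : Char) : pvFI [] c = -1 := rfl

theorem pvFI_append_singleton (s : List Char) (ch c : Char) :
    pvFI (s ++ [ch]) c = if pvFI s c < 0 ∧ ch = c then (s.length : Int) else pvFI s c := by
  unfold pvFI
  rw [List.findIdx?_append]
  cases h : s.findIdx? (· = c) with
  | some i =>
    have : ¬ ((i:Int) < 0) := by omega
    simp [this]
  | none =>
    by_cases hc : ch = c <;> simp [hc, List.findIdx?_cons]

theorem pvFI_nonneg_iff (s : List Char) (c : Char) : 0 ≤ pvFI s c ↔ c ∈ s := by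
  unfold pvFI
  cases h : s.findIdx? (· = c) with
  | some i =>
    simp only [Int.natCast_nonneg, true_iff]
    have h2 := List.of_findIdx?_eq_some h
    have hlt := (List.findIdx?_eq_some_iff_findIdx_eq.mp h).1
    have hm := List.getElem_mem hlt
    simp only [List.getElem?_eq_getElem hlt, decide_eq_true_eq] at h2
    rwa [← h2]
  | none =>
    simp only [show ¬ ((0:Int) ≤ -1) by decide, false_iff]
    intro hc
    have := List.findIdx?_eq_none_iff.mp h c hc
    simp at this

-- splitOnMax with a one-char separator and maxsplit 1, characterised by the first index
theorem pvGo_zero (c : Char) (fuel : Nat) (s : List Char) (acc : List (List Char)) :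
    PySem.Chars.splitOnMax.go [c] fuel 0 s [] acc = (s :: acc).reverse := by
  cases fuel <;> cases s <;> rw [PySem.Chars.splitOnMax.go.eq_def] <;> simp

theorem pvGo_one (c : Char) (s : List Char) : ∀ (fuel : Nat), s.length < fuel →
    ∀ (cur : List Char) (acc : List (List Char)),
    PySem.Chars.splitOnMax.go [c] fuel 1 s cur acc =
      (match s.findIdx? (· = c) with
       | some i => (s.drop (i + 1)) :: (cur.reverse ++ s.take i) :: acc
       | none => (cur.reverse ++ s) :: acc).reverse := by
  induction s with
  | nil =>
    intro fuel hf cur acc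
    cases fuel <;> rw [PySem.Chars.splitOnMax.go.eq_def] <;> simp
  | cons a rest ih =>
    intro fuel hf cur acc
    cases fuel with
    | zero => omega
    | succ f =>
      rw [PySem.Chars.splitOnMax.go.eq_def]
      simp only [List.length_cons] at hf
      by_cases hac : a = c
      · subst hac
        have hpre : [a].isPrefixOf (a :: rest) = true := by simp [List.isPrefixOf]
        simp only [hpre, if_true, one_ne_zero, if_false, List.length_singleton, List.drop_one,
          List.tail_cons]
        rw [pvGo_zero]
        simp [List.findIdx?_cons]
      · have hpre : [a].isPrefixOf (a :: rest) = true := by simp [List.isPrefixOf]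
        have hpre' : [c].isPrefixOf (a :: rest) = false := by
          simp [List.isPrefixOf, Ne.symm hac]
        simp only [hpre', one_ne_zero, if_false, Bool.false_eq_true]
        rw [ih f (by omega)]
        rw [List.findIdx?_cons]
        simp only [hac, decide_false]
        cases h : rest.findIdx? (· = c) <;> simp [List.reverse_cons, List.append_assoc]

theorem pvSplitOnMax_one (s : List Char) (c : Char) :
    PySem.Chars.splitOnMax s [c] 1 =
      match s.findIdx? (· = c) with
      | some i => [s.take i, s.drop (i + 1)]
      | none => [s] := by
  unfold PySem.Chars.splitOnMax
  rw [if_neg (by omega)]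
  rw [show ((1:Int).toNat) = 1 from rfl]
  rw [pvGo_one c s (s.length + 1) (by omega)]
  cases h : s.findIdx? (· = c) <;> simp


theorem pvStrip_ws_left (w x : List Char) (hw : ∀ c ∈ w, PySem.Chars.isspace c = true) :
    PySem.Chars.strip (w ++ x) = PySem.Chars.strip x := by
  unfold PySem.Chars.strip PySem.Chars.lstrip
  have hwe : List.dropWhile PySem.Chars.isspace w = [] := List.dropWhile_eq_nil_iff.mpr hw
  rw [List.dropWhile_append, hwe]
  simp

theorem pvRstrip_ws_right (x v : List Char) (hv : ∀ c ∈ v, PySem.Chars.isspace c = true) :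
    PySem.Chars.rstrip (x ++ v) = PySem.Chars.rstrip x := by
  unfold PySem.Chars.rstrip
  rw [List.reverse_append, List.dropWhile_append]
  have hve : List.dropWhile PySem.Chars.isspace v.reverse = [] :=
    List.dropWhile_eq_nil_iff.mpr (by simpa using hv)
  rw [hve]
  simp

theorem pvStrip_ws_right (x v : List Char) (hv : ∀ c ∈ v, PySem.Chars.isspace c = true) :
    PySem.Chars.strip (x ++ v) = PySem.Chars.strip x := by
  unfold PySem.Chars.strip PySem.Chars.lstrip
  rw [List.dropWhile_append]
  by_cases he : (x.dropWhile PySem.Chars.isspace).isEmpty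
  · rw [List.isEmpty_iff] at he
    simp only [he, List.isEmpty_nil, if_pos, List.nil_append]
    have h1 := pvRstrip_ws_right [] (List.dropWhile PySem.Chars.isspace v)
      (fun c hc => hv c ((List.dropWhile_sublist _).mem hc))
    simpa using h1
  · simp only [he, Bool.false_eq_true, ite_false]
    exact pvRstrip_ws_right _ _ hv

theorem pvStrip_decomp (s : List Char) :
    ∃ w v, s = w ++ PySem.Chars.strip s ++ v ∧
      (∀ c ∈ w, PySem.Chars.isspace c = true) ∧ (∀ c ∈ v, PySem.Chars.isspace c = true) := by
  refine ⟨s.takeWhile PySem.Chars.isspace,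
    ((s.dropWhile PySem.Chars.isspace).reverse.takeWhile PySem.Chars.isspace).reverse, ?_, ?_, ?_⟩
  · have h2 : s.dropWhile PySem.Chars.isspace =
        PySem.Chars.strip s ++ ((s.dropWhile PySem.Chars.isspace).reverse.takeWhile PySem.Chars.isspace).reverse := by
      unfold PySem.Chars.strip PySem.Chars.lstrip PySem.Chars.rstrip
      conv_lhs => rw [← List.reverse_reverse (s.dropWhile PySem.Chars.isspace)]
      conv_lhs => rw [← List.takeWhile_append_dropWhile (p := PySem.Chars.isspace)
        (l := (s.dropWhile PySem.Chars.isspace).reverse)]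
      rw [List.reverse_append]
    conv_lhs => rw [← List.takeWhile_append_dropWhile (p := PySem.Chars.isspace) (l := s)]
    nth_rewrite 1 [h2]
    rw [List.append_assoc]
  · exact fun c hc => List.mem_takeWhile_imp hc
  · intro c hc
    rw [List.mem_reverse] at hc
    exact List.mem_takeWhile_imp hc

theorem pvStrip_idem (s : List Char) : PySem.Chars.strip (PySem.Chars.strip s) = PySem.Chars.strip s := by
  obtain ⟨w, v, hs, hw, hv⟩ := pvStrip_decomp s
  conv_rhs => rw [hs]
  rw [List.append_assoc, pvStrip_ws_left _ _ hw, pvStrip_ws_right _ _ hv]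

theorem pvIsIn_singleton_iff (c : Char) (s : List Char) : PySem.Chars.isIn [c] s = true ↔ c ∈ s := by
  rw [PySem.Chars.isIn_iff_infix, List.singleton_infix_iff]

theorem pvFindIdx?_ws_none (w : List Char) (c : Char)
    (hw : ∀ x ∈ w, PySem.Chars.isspace x = true) (hc : PySem.Chars.isspace c = false) :
    w.findIdx? (· = c) = none := by
  rw [List.findIdx?_eq_none_iff]
  intro x hx
  simp only [decide_eq_false_iff_not]
  intro h; subst h; rw [hw x hx] at hc; cases hc

theorem pvFI_decomp_some (w s v : List Char) (c : Char) (i : Nat)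
    (hw : ∀ x ∈ w, PySem.Chars.isspace x = true) (hv : ∀ x ∈ v, PySem.Chars.isspace x = true)
    (hc : PySem.Chars.isspace c = false) (h : s.findIdx? (· = c) = some i) :
    pvFI (w ++ s ++ v) c = (w.length : Int) + (i : Int) := by
  unfold pvFI
  rw [List.append_assoc, List.findIdx?_append, pvFindIdx?_ws_none w c hw hc,
    List.findIdx?_append, pvFindIdx?_ws_none v c hv hc]
  simp [h]
  omega

theorem pvFI_decomp_none (w s v : List Char) (c : Char)
    (hw : ∀ x ∈ w, PySem.Chars.isspace x = true) (hv : ∀ x ∈ v, PySem.Chars.isspace x = true)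
    (hc : PySem.Chars.isspace c = false) (h : s.findIdx? (· = c) = none) :
    pvFI (w ++ s ++ v) c = -1 := by
  unfold pvFI
  rw [List.append_assoc, List.findIdx?_append, pvFindIdx?_ws_none w c hw hc,
    List.findIdx?_append, pvFindIdx?_ws_none v c hv hc]
  simp [h]

-- close() of a segment whose eq/colon fields record its first indices = A's processing of the stripped segment
theorem pvClose_eq_proc (pd : List String × PySem.Dict String String) (seg : List Char) :
    pvCloseB pd seg (pvFI seg '=') (pvFI seg ':') = pvProcItemA pd (PySem.Chars.strip seg) := by
  obtain ⟨w, v, hs, hw, hv⟩ := pvStrip_decomp seg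
  set s := PySem.Chars.strip seg with hsdef
  -- strip of a prefix slice of seg = strip of the matching prefix of s
  have hstrip_take : ∀ k : Nat, k ≤ s.length →
      PySem.Chars.strip (PySem.List.slice seg none (some ((w.length : Int) + (k : Int)))) =
        PySem.Chars.strip (s.take k) := by
    intro k hk
    rw [show ((w.length : Int) + (k : Int)) = ((w.length + k : Nat) : Int) by push_cast; ring,
      PySem.List.slice_to_natCast]
    conv_lhs => rw [hs]
    rw [List.append_assoc, List.take_append, List.take_of_length_le (by omega),
      show w.length + k - w.length = k by omega, List.take_append_of_le_length hk,
      pvStrip_ws_left w _ hw]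
  -- strip of a suffix slice of seg = strip of the matching suffix of s
  have hstrip_drop : ∀ k : Nat, k ≤ s.length →
      PySem.Chars.strip (PySem.List.slice seg (some ((w.length : Int) + (k : Int))) none) =
        PySem.Chars.strip (s.drop k) := by
    intro k hk
    rw [show ((w.length : Int) + (k : Int)) = ((w.length + k : Nat) : Int) by push_cast; ring,
      PySem.List.slice_from_natCast]
    conv_lhs => rw [hs]
    rw [List.append_assoc, List.drop_append, List.drop_of_length_le (by omega),
      show w.length + k - w.length = k by omega, List.nil_append,
      List.drop_append_of_le_length hk, pvStrip_ws_right _ v hv]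
  cases he : s.findIdx? (· = '=') with
  | some i =>
    have hi : i < s.length := (List.findIdx?_eq_some_iff_findIdx_eq.mp he).1
    have heq : pvFI seg '=' = (w.length : Int) + (i : Int) := by
      conv_lhs => rw [hs]
      exact pvFI_decomp_some w s v '=' i hw hv (by decide) he
    have hmem : '=' ∈ s := by
      have h0 : (0:Int) ≤ (i : Int) → '=' ∈ s := by
        simpa [pvFI, he] using (pvFI_nonneg_iff s '=').mp
      exact h0 (by omega)
    have hisin : PySem.Chars.isIn ['='] s = true := (pvIsIn_singleton_iff _ _).mpr hmem
    -- A's two split results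
    have hparts : PySem.Chars.splitOnMax s ['='] 1 = [s.take i, s.drop (i + 1)] := by
      rw [pvSplitOnMax_one, he]
    -- the name A computes, by cases on the first ':'
    cases hc : s.findIdx? (· = ':') with
    | some j =>
      have hj : j < s.length := (List.findIdx?_eq_some_iff_findIdx_eq.mp hc).1
      have hco : pvFI seg ':' = (w.length : Int) + (j : Int) := by
        conv_lhs => rw [hs]
        exact pvFI_decomp_some w s v ':' j hw hv (by decide) hc
      have hnamesplit : (PySem.Chars.splitOnMax (s.take i) [':'] 1).headD [] =
          if j < i then s.take j else s.take i := by
        rw [pvSplitOnMax_one, List.findIdx?_take, hc]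
        by_cases hji : j < i
        · simp [Option.guard, hji, List.take_take, Nat.min_eq_left (Nat.le_of_lt hji)]
        · simp [Option.guard, hji]
      simp only [pvCloseB, pvProcItemA, heq, hco, hisin, if_true, hparts, List.headD_cons,
        List.drop_one, List.tail_cons]
      rw [if_pos (by omega : (0:Int) ≤ (w.length : Int) + (i : Int))]
      rw [hnamesplit]
      by_cases hji : j < i
      · rw [if_pos (by constructor <;> omega)]
        rw [hstrip_take j (by omega),
          show ((w.length : Int) + (i : Int) + 1) = ((w.length : Int) + ((i + 1 : Nat) : Int)) by
            push_cast; ring,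
          hstrip_drop (i + 1) (by omega)]
        simp [hji]
      · rw [if_neg (by intro hcon; omega)]
        rw [hstrip_take i (by omega),
          show ((w.length : Int) + (i : Int) + 1) = ((w.length : Int) + ((i + 1 : Nat) : Int)) by
            push_cast; ring,
          hstrip_drop (i + 1) (by omega)]
        simp [hji]
    | none =>
      have hco : pvFI seg ':' = -1 := by
        conv_lhs => rw [hs]
        exact pvFI_decomp_none w s v ':' hw hv (by decide) hc
      have hnamesplit : (PySem.Chars.splitOnMax (s.take i) [':'] 1).headD [] = s.take i := by
        rw [pvSplitOnMax_one, List.findIdx?_take, hc]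
        simp
      simp only [pvCloseB, pvProcItemA, heq, hco, hisin, if_true, hparts, List.headD_cons,
        List.drop_one, List.tail_cons]
      rw [if_pos (by omega : (0:Int) ≤ (w.length : Int) + (i : Int))]
      rw [hnamesplit]
      rw [if_neg (by intro hcon; omega)]
      rw [hstrip_take i (by omega),
        show ((w.length : Int) + (i : Int) + 1) = ((w.length : Int) + ((i + 1 : Nat) : Int)) by
          push_cast; ring,
        hstrip_drop (i + 1) (by omega)]
  | none =>
    have heq : pvFI seg '=' = -1 := by
      conv_lhs => rw [hs]
      exact pvFI_decomp_none w s v '=' hw hv (by decide) he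
    have hnomem : '=' ∉ s := by
      intro hmem
      have h0 : (0:Int) ≤ -1 := by
        simpa [pvFI, he] using (pvFI_nonneg_iff s '=').mpr hmem
      omega
    have hisin : PySem.Chars.isIn ['='] s = false := by
      rw [← Bool.not_eq_true]
      intro hcon
      exact hnomem ((pvIsIn_singleton_iff _ _).mp hcon)
    cases hc : s.findIdx? (· = ':') with
    | some j =>
      have hj : j < s.length := (List.findIdx?_eq_some_iff_findIdx_eq.mp hc).1
      have hco : pvFI seg ':' = (w.length : Int) + (j : Int) := by
        conv_lhs => rw [hs]
        exact pvFI_decomp_some w s v ':' j hw hv (by decide) hc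
      have hnamesplit : (PySem.Chars.splitOnMax s [':'] 1).headD [] = s.take j := by
        rw [pvSplitOnMax_one, hc]
        rfl
      simp only [pvCloseB, pvProcItemA, heq, hco, hisin, Bool.false_eq_true, if_false]
      rw [if_neg (by omega : ¬ (0:Int) ≤ -1)]
      rw [if_pos (by omega : (0:Int) ≤ (w.length : Int) + (j : Int))]
      rw [hnamesplit, hstrip_take j (by omega)]
    | none =>
      have hco : pvFI seg ':' = -1 := by
        conv_lhs => rw [hs]
        exact pvFI_decomp_none w s v ':' hw hv (by decide) hc
      have hnamesplit : (PySem.Chars.splitOnMax s [':'] 1).headD [] = s := by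
        rw [pvSplitOnMax_one, hc]
        rfl
      simp only [pvCloseB, pvProcItemA, heq, hco, hisin, Bool.false_eq_true, if_false]
      rw [if_neg (by omega : ¬ (0:Int) ≤ -1), if_neg (by omega : ¬ (0:Int) ≤ -1)]
      rw [hnamesplit]
      have hlen : PySem.List.slice seg none (some ((seg.length : Nat) : Int)) = seg := by
        rw [PySem.List.slice_to_natCast]
        simp
      rw [hlen, ← hsdef, pvStrip_idem]

-- A's split fold only appends to args
theorem pvSplitStepA_args (cs : List Char) : ∀ (a0 : List (List Char)) (cur : List Char) (d : Int),
    cs.foldl pvSplitStepA (a0, cur, d) =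
      (a0 ++ (cs.foldl pvSplitStepA ([], cur, d)).1, (cs.foldl pvSplitStepA ([], cur, d)).2) := by
  induction cs with
  | nil => intro a0 cur d; simp
  | cons ch cs ih =>
    intro a0 cur d
    simp only [List.foldl_cons]
    by_cases h : ch = ',' ∧ d = 0
    · have h1 : pvSplitStepA (a0, cur, d) ch = (a0 ++ [PySem.Chars.strip cur], [], d) := by
        unfold pvSplitStepA; rw [if_pos h]; try rfl
      have h2 : pvSplitStepA ([], cur, d) ch = ([PySem.Chars.strip cur], [], d) := by
        unfold pvSplitStepA; rw [if_pos h]; try rfl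
      rw [h1, h2, ih (a0 ++ [PySem.Chars.strip cur]) [] d, ih [PySem.Chars.strip cur] [] d]
      simp
    · have h1 : pvSplitStepA (a0, cur, d) ch =
          (a0, cur ++ [ch], (pvSplitStepA ([], cur, d) ch).2.2) := by
        unfold pvSplitStepA; rw [if_neg h, if_neg h]
      have h2 : pvSplitStepA ([], cur, d) ch =
          ([], cur ++ [ch], (pvSplitStepA ([], cur, d) ch).2.2) := by
        conv_lhs => rw [pvSplitStepA.eq_def, if_neg h]
        conv_rhs => rw [pvSplitStepA.eq_def, if_neg h]
      rw [h1]
      conv_rhs => rw [h2]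
      rw [ih a0 (cur ++ [ch]) _, ih [] (cur ++ [ch]) _]
      try simp

-- main invariant: the fused scan equals split-then-process
theorem pvScan_eq (cs : List Char) : ∀ (pd : List String × PySem.Dict String String)
    (seg : List Char) (depth : Int),
    pvScanB cs pd seg (pvFI seg '=') (pvFI seg ':') depth =
      (let st := cs.foldl pvSplitStepA ([], seg, depth)
       let items := if PySem.Chars.strip st.2.1 ≠ [] then st.1 ++ [PySem.Chars.strip st.2.1] else st.1
       items.foldl pvProcItemA pd) := by
  induction cs with
  | nil =>
    intro pd seg depth
    simp only [List.foldl_nil, pvScanB]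
    by_cases h : PySem.Chars.strip seg ≠ []
    · simp only [h, if_true, ne_eq, not_false_iff, pvClose_eq_proc]
      simp
    · simp only [h, if_false]
      simp
  | cons ch cs ih =>
    intro pd seg depth
    simp only [List.foldl_cons]
    by_cases h : ch = ',' ∧ depth = 0
    · have hstep : pvSplitStepA ([], seg, depth) ch = ([PySem.Chars.strip seg], [], depth) := by
        unfold pvSplitStepA; rw [if_pos h]; try rfl
      have h0 : pvScanB (ch :: cs) pd seg (pvFI seg '=') (pvFI seg ':') depth =
          pvScanB cs (pvProcItemA pd (PySem.Chars.strip seg)) [] (pvFI [] '=') (pvFI [] ':') depth := by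
        simp only [pvScanB, if_pos h, pvClose_eq_proc]
        rfl
      rw [h0, ih, hstep, pvSplitStepA_args cs [PySem.Chars.strip seg] [] depth]
      by_cases ht : PySem.Chars.strip (cs.foldl pvSplitStepA ([], [], depth)).2.1 ≠ [] <;>
        simp [ht, List.foldl_append]
    · have heq' : (if ch = '=' ∧ pvFI seg '=' < 0 then (seg.length : Int) else pvFI seg '=') =
          pvFI (seg ++ [ch]) '=' := by
        rw [pvFI_append_singleton]
        by_cases hc : ch = '=' <;> simp [hc, and_comm]
      have hcol' : (if ¬(ch = '=' ∧ pvFI seg '=' < 0) ∧ (ch = ':' ∧ pvFI seg ':' < 0)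
            then (seg.length : Int) else pvFI seg ':') = pvFI (seg ++ [ch]) ':' := by
        rw [pvFI_append_singleton]
        by_cases hc : ch = ':'
        · subst hc
          simp only [show ¬((':' : Char) = '=') from by decide, false_and, not_false_iff,
            true_and, and_comm]
        · simp [hc]
      have h0 : pvScanB (ch :: cs) pd seg (pvFI seg '=') (pvFI seg ':') depth =
          pvScanB cs pd (seg ++ [ch]) (pvFI (seg ++ [ch]) '=') (pvFI (seg ++ [ch]) ':')
            (if ch ∈ ['(', '[', '{'] then depth + 1
             else if ch ∈ [')', ']', '}'] then depth - 1 else depth) := by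
        simp only [pvScanB, if_neg h]
        rw [heq', hcol']
      have hstep : pvSplitStepA ([], seg, depth) ch =
          ([], seg ++ [ch],
            if ch ∈ ['(', '[', '{'] then depth + 1
            else if ch ∈ [')', ']', '}'] then depth - 1 else depth) := by
        unfold pvSplitStepA; rw [if_neg h]
      rw [h0, ih, hstep]

-- ===== VERDICT (by name: the statement is the Claim_ definition above) =====
theorem parse_macro_params_spec : Claim_equal_parse_macro_params := by
  intro text _
  unfold Spec_parse_macro_params parse_macro_params parse_macro_params_alt
  by_cases h : PySem.Str.strip text = ""
  · simp [h]
  · simp only [h, if_false]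
    have := pvScan_eq text.toList ([], (⟨[]⟩ : PySem.Dict String String)) [] 0
    simp only [pvFI_nil] at this
    rw [this]
    rfl
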